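-- pv_equiv track=rewrite | github.com/MrBrantCode/unitest_baseline | mut_generate/mist_train_cf/cf_95619/solution.py | reverse_and_remove_duplicates
-- ===== SOURCE A (Python) =====
-- def reverse_and_remove_duplicates(input_list):
--     seen = set()
--     result = []
--     for num in reversed(input_list):
--         if num not in seen:
--             result.append(num)
--             seen.add(num)
--     return result
-- ===== SOURCE B (Python) =====
-- def reverse_and_remove_duplicates(input_list):
--     last = {}
--     for num in input_list:
--         last.pop(num, None)
--         last[num] = None
--     return list(reversed(last))
-- ===== Notes on version B (the rewrite author's own statement) =====
-- stated objective: alternative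
-- what changed: Forward single pass over a dict whose pop-then-reinsert moves each value to its last-occurrence position, read out in reverse, instead of scanning the reversed list with an auxiliary seen-set.
import Mathlib
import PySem

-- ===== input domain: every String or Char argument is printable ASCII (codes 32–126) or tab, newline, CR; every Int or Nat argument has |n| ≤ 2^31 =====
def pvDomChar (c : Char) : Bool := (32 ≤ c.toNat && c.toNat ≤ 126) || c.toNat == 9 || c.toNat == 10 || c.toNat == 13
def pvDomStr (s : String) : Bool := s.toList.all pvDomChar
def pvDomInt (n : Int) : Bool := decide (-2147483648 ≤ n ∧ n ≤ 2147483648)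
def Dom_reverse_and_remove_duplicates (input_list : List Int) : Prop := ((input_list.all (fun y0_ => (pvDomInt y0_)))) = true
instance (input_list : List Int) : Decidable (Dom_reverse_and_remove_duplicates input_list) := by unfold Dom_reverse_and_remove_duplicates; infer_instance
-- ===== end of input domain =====

-- B replaces A's reversed scan + seen-set with a forward pass over a dict whose pop-then-reinsert keeps each value at its last occurrence, read out reversed (idiomatic keep-last decomposition, same results).

-- ===== PORT A =====
-- for num in reversed(input_list): if num not in seen: result.append(num); seen.add(num)
def reverse_and_remove_duplicates (input_list : List Int) : List Int :=
  (input_list.reverse.foldl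
    (fun (st : PySem.Set Int × List Int) num =>
      if !(PySem.Set.contains st.1 num) then (PySem.Set.add st.1 num, st.2 ++ [num]) else st)
    (PySem.Set.empty, [])).2

-- ===== PORT B =====
-- for num in input_list: last.pop(num, None); last[num] = None; return list(reversed(last))
-- dict.pop(num, None) never raises: its effect on the dict is exactly Dict.erase (the returned value is unused)
def reverse_and_remove_duplicates_alt (input_list : List Int) : List Int :=
  ((input_list.foldl
      (fun (last : PySem.Dict Int (Option Int)) num =>
        PySem.Dict.insert (PySem.Dict.erase last num) num none)
      PySem.Dict.empty).keys).reverse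

-- ===== PRECONDITION & SPEC =====
def Spec_reverse_and_remove_duplicates (input_list : List Int) (out : List Int) : Prop := out = reverse_and_remove_duplicates_alt input_list
instance (input_list : List Int) (out : List Int) : Decidable (Spec_reverse_and_remove_duplicates input_list out) := by unfold Spec_reverse_and_remove_duplicates; infer_instance

-- ===== CLAIM (what is proved, stated in full; the proofs are below) =====
def Claim_equal_reverse_and_remove_duplicates : Prop := ∀ (input_list : List Int), Dom_reverse_and_remove_duplicates input_list → Spec_reverse_and_remove_duplicates input_list (reverse_and_remove_duplicates input_list)

-- ===== LEMMAS AND PROOFS =====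

-- dedup keeping first occurrences, relative to an already-seen list s (only membership of s matters)
def dedupSeen (s : List Int) : List Int → List Int
  | [] => []
  | x :: xs => if x ∈ s then dedupSeen s xs else x :: dedupSeen (s ++ [x]) xs

theorem dedupSeen_congr (s₁ s₂ : List Int) (r : List Int)
    (h : ∀ y, y ∈ s₁ ↔ y ∈ s₂) : dedupSeen s₁ r = dedupSeen s₂ r := by
  induction r generalizing s₁ s₂ with
  | nil => rfl
  | cons x xs ih =>
    simp only [dedupSeen]
    by_cases hx : x ∈ s₁
    · rw [if_pos hx, if_pos ((h x).mp hx)]; exact ih _ _ h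
    · rw [if_neg hx, if_neg (fun c => hx ((h x).mpr c))]
      exact congrArg (x :: ·) (ih _ _ (by intro y; simp [h y]))

theorem mem_dedupSeen_not_seen (s : List Int) (r : List Int) (y : Int)
    (hy : y ∈ dedupSeen s r) : y ∉ s := by
  induction r generalizing s with
  | nil => simp [dedupSeen] at hy
  | cons x xs ih =>
    simp only [dedupSeen] at hy
    split at hy
    · exact ih _ hy
    · rcases List.mem_cons.mp hy with h | h
      · subst h; assumption
      · have := ih _ h
        simp only [List.mem_append] at this
        exact fun hm => this (Or.inl hm)

theorem nodup_dedupSeen (s : List Int) (r : List Int) : (dedupSeen s r).Nodup := by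
  induction r generalizing s with
  | nil => exact List.nodup_nil
  | cons x xs ih =>
    simp only [dedupSeen]
    split
    · exact ih _
    · refine List.nodup_cons.mpr ⟨fun hx => ?_, ih _⟩
      exact mem_dedupSeen_not_seen _ _ _ hx (by simp)

theorem dedupSeen_append_singleton (s : List Int) (x : Int) (r : List Int) :
    dedupSeen (s ++ [x]) r = (dedupSeen s r).erase x := by
  induction r generalizing s with
  | nil => rfl
  | cons y ys ih =>
    by_cases hs : y ∈ s
    · simp only [dedupSeen, if_pos (List.mem_append.mpr (Or.inl hs)), if_pos hs]
      exact ih s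
    · by_cases hxy : y = x
      · subst hxy
        simp only [dedupSeen, if_pos (by simp : y ∈ s ++ [y]), if_neg hs, List.erase_cons_head]
      · have h1 : y ∉ s ++ [x] := by simp [hs, hxy]
        simp only [dedupSeen, if_neg h1, if_neg hs]
        rw [List.erase_cons_tail (by simp [hxy])]
        rw [dedupSeen_congr ((s ++ [x]) ++ [y]) ((s ++ [y]) ++ [x]) ys
          (by intro z; simp; tauto), ih (s ++ [y])]

-- A's fold computes dedupSeen
theorem foldA_eq (r : List Int) (s : PySem.Set Int) (res : List Int) :
    (r.foldl
      (fun (st : PySem.Set Int × List Int) num =>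
        if !(PySem.Set.contains st.1 num) then (PySem.Set.add st.1 num, st.2 ++ [num]) else st)
      (s, res)).2 = res ++ dedupSeen s r := by
  induction r generalizing s res with
  | nil => simp [dedupSeen]
  | cons x xs ih =>
    rw [List.foldl_cons]
    by_cases hc : x ∈ s
    · have h1 : (if !(PySem.Set.contains s x) then (PySem.Set.add s x, res ++ [x])
          else ((s : PySem.Set Int), res)) = (s, res) := by
        simp [PySem.Set.contains, hc]
      rw [h1, ih]
      simp only [dedupSeen, if_pos hc]
    · have h1 : (if !(PySem.Set.contains s x) then (PySem.Set.add s x, res ++ [x])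
          else ((s : PySem.Set Int), res)) = (s ++ [x], res ++ [x]) := by
        simp [PySem.Set.contains, PySem.Set.add, hc]
      rw [h1, ih]
      simp only [dedupSeen, if_neg hc, List.append_assoc, List.singleton_append]

-- one dict step, viewed on keys: drop num (all occurrences — keys are a filter), append num
theorem keys_step (d : PySem.Dict Int (Option Int)) (num : Int) :
    (PySem.Dict.insert (PySem.Dict.erase d num) num none).keys
      = d.keys.filter (fun y => !(y == num)) ++ [num] := by
  rw [PySem.Dict.keys_insert_of_not_contains _ _
    (by simp [PySem.Dict.erase, PySem.Dict.contains, List.any_filter])]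
  simp only [PySem.Dict.erase, PySem.Dict.keys, List.filter_map]
  rfl

-- B's dict fold, projected to keys, is a filter-append fold over plain lists
theorem keys_foldD (l : List Int) (d : PySem.Dict Int (Option Int)) :
    (l.foldl
      (fun (last : PySem.Dict Int (Option Int)) num =>
        PySem.Dict.insert (PySem.Dict.erase last num) num none) d).keys
      = l.foldl (fun acc num => acc.filter (fun y => !(y == num)) ++ [num]) d.keys := by
  induction l generalizing d with
  | nil => rfl
  | cons x xs ih => rw [List.foldl_cons, List.foldl_cons, ih, keys_step]

-- the filter-append fold computes (dedupSeen [] ·.reverse).reverse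
theorem foldB_eq (l : List Int) :
    l.foldl (fun acc num => acc.filter (fun y => !(y == num)) ++ [num]) []
      = (dedupSeen [] l.reverse).reverse := by
  induction l using List.reverseRecOn with
  | nil => rfl
  | append_singleton xs x ih =>
    rw [List.foldl_append, ih, List.foldl_cons, List.foldl_nil]
    have hnd : (dedupSeen [] xs.reverse).Nodup := nodup_dedupSeen _ _
    have he : (dedupSeen [] xs.reverse).erase x
        = (dedupSeen [] xs.reverse).filter (fun y => !(y == x)) := by
      simpa [bne] using hnd.erase_eq_filter x
    rw [List.filter_reverse, ← he]
    have hx : dedupSeen [] (x :: xs.reverse) = x :: (dedupSeen [] xs.reverse).erase x := by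
      rw [← dedupSeen_append_singleton [] x xs.reverse]
      simp only [dedupSeen, List.not_mem_nil, List.nil_append]
      rfl
    rw [List.reverse_append, List.reverse_singleton, List.singleton_append, hx]
    simp

-- ===== VERDICT (by name: the statement is the Claim_ definition above) =====
theorem reverse_and_remove_duplicates_spec : Claim_equal_reverse_and_remove_duplicates := by
  intro input_list _
  show _ = _
  rw [reverse_and_remove_duplicates, reverse_and_remove_duplicates_alt, foldA_eq, keys_foldD]
  have : (PySem.Dict.empty : PySem.Dict Int (Option Int)).keys = [] := rfl
  rw [this, foldB_eq]
  simp [PySem.Set.empty]
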